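-- pv_equiv track=rewrite | github.com/vascovc/FP | Extra Y/exer3.py | trainsPerMerchandise
-- ===== SOURCE A (Python) =====
-- def trainsPerMerchandise(trains):
--     dic = {}
--     for train_ in trains:
--         for a in trains[train_]:
--             if a[0] not in dic:
--                 dic[a[0]] = {train_}
--             else:
--                 set1 = dic[a[0]]
--                 set2 = {train_}
--                 dic[a[0]] = set1|set2
--     return dic
-- ===== SOURCE B (Python) =====
-- def trainsPerMerchandise(trains):
--     # Pass 1: gather the distinct merchandise names in first-occurrence order.
--     merch = []
--     for cars in trains.values():
--         for a in cars:
--             if a[0] not in merch: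
--                 merch.append(a[0])
--     # Pass 2: for each merchandise, scan all trains and collect those carrying it.
--     return {m: {t for t in trains if any(a[0] == m for a in trains[t])} for m in merch}
-- ===== Notes on version B (the rewrite author's own statement) =====
-- stated objective: alternative
-- what changed: A builds the merchandise->trains index in a single pass, growing/unioning sets in a dict as it scans; B first collects the distinct merchandise names in one pass, then builds the result by a comprehension that rescans all trains per merchandise.
-- outside the precondition, e.g. on trainsPerMerchandise({'t': [[]]}): A raises IndexError, B raises IndexError
import Mathlib
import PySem

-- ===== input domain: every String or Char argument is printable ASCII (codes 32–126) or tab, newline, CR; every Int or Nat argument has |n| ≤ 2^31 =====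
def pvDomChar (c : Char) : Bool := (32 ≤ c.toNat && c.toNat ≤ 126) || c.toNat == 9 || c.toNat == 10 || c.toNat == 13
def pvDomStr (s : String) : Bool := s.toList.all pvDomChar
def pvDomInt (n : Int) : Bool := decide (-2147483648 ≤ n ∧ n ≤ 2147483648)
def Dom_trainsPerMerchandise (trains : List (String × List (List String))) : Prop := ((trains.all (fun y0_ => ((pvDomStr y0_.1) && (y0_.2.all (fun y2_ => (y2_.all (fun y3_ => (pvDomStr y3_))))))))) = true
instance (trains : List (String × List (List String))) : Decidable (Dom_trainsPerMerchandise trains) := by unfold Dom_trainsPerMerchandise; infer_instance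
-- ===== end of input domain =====

-- B replaces A's single dict-building pass by a collect-merchandise-pass followed by a per-merchandise rescan of all trains (alternative decomposition, return value only).


-- ===== PORT A =====
-- dict merchandise -> set of trains, built in one pass; 'a[0]' is total here only
-- because Pre_ excludes empty merchandise lists (PySem.List.pyGetD a 0 "" is exact on nonempty a).
def trainsPerMerchandise (trains : List (String × List (List String))) : List (String × List String) :=
  (trains.foldl (fun dic p =>
      p.2.foldl (fun dic a =>
        let m := PySem.List.pyGetD a 0 ""          -- a[0] (Pre_: a ≠ [])
        match dic.get? m with
        | none => dic.insert m (PySem.Set.ofList [p.1])                       -- dic[a[0]] = {train_}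
        | some set1 => dic.insert m (PySem.Set.union set1 [p.1])) dic)        -- dic[a[0]] = set1 | {train_}
    (PySem.Dict.empty : PySem.Dict String (List String))).items

-- ===== PORT B =====
def trainsPerMerchandise_alt (trains : List (String × List (List String))) : List (String × List String) :=
  -- pass 1: distinct merchandise names in first-occurrence order
  let merch : PySem.Set String :=
    trains.foldl (fun acc p => p.2.foldl (fun acc a => PySem.Set.add acc (PySem.List.pyGetD a 0 "")) acc) PySem.Set.empty
  -- pass 2: per merchandise, the set of trains carrying it
  merch.map (fun m =>
    (m, PySem.Set.ofList ((trains.filter (fun p => p.2.any (fun a => PySem.List.pyGetD a 0 "" == m))).map Prod.fst)))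

-- ===== PRECONDITION & SPEC =====
-- Pre_ excludes inputs with an empty merchandise list (A raises IndexError on a[0]) and
-- assoc lists with duplicate train keys (those do not represent a Python dict argument).
def Pre_trainsPerMerchandise (trains : List (String × List (List String))) : Prop :=
  (trains.map Prod.fst).Nodup ∧ ∀ p ∈ trains, ∀ a ∈ p.2, a ≠ []
instance (trains : List (String × List (List String))) : Decidable (Pre_trainsPerMerchandise trains) := by
  unfold Pre_trainsPerMerchandise; infer_instance
def pvWitness_trainsPerMerchandise : (List (String × List (List String))) :=
  [("t1", [["coal"], ["wood", "x"]]), ("t2", [["coal"]])]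
def Spec_trainsPerMerchandise (trains : List (String × List (List String))) (out : List (String × List String)) : Prop := out = trainsPerMerchandise_alt trains
instance (trains : List (String × List (List String))) (out : List (String × List String)) : Decidable (Spec_trainsPerMerchandise trains out) := by unfold Spec_trainsPerMerchandise; infer_instance

-- ===== CLAIM (what is proved, stated in full; the proofs are below) =====
def Claim_equal_trainsPerMerchandise : Prop := ∀ (trains : List (String × List (List String))), Dom_trainsPerMerchandise trains → Pre_trainsPerMerchandise trains → Spec_trainsPerMerchandise trains (trainsPerMerchandise trains)

-- ===== LEMMAS AND PROOFS =====

-- the trains (in order) whose merchandise list contains m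
def pvCarriers (L : List (String × List (List String))) (m : String) : List String :=
  (L.filter (fun p => p.2.any (fun a => PySem.List.pyGetD a 0 "" == m))).map Prod.fst

-- the distinct merchandise names of L, first-occurrence order
def pvMerch (L : List (String × List (List String))) : List String :=
  L.foldl (fun acc p => p.2.foldl (fun acc a => PySem.Set.add acc (PySem.List.pyGetD a 0 "")) acc) []

lemma mem_foldl_add {l : List (List String)} {s : List String} {x : String} :
    x ∈ l.foldl (fun acc a => PySem.Set.add acc (PySem.List.pyGetD a 0 "")) s ↔
      x ∈ s ∨ l.any (fun a => PySem.List.pyGetD a 0 "" == x) := by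
  induction l generalizing s with
  | nil => simp
  | cons a l ih =>
      rw [List.foldl_cons, ih]
      simp only [PySem.Set.mem_add, List.any_cons, Bool.or_eq_true, beq_iff_eq]
      constructor
      · rintro ((h | h) | h) <;> tauto
      · rintro (h | h | h) <;> tauto

lemma nodup_foldl_add {l : List (List String)} {s : List String} (hs : s.Nodup) :
    (l.foldl (fun acc a => PySem.Set.add acc (PySem.List.pyGetD a 0 "")) s).Nodup := by
  induction l generalizing s with
  | nil => exact hs
  | cons a l ih =>
      exact ih (PySem.Set.nodup_add _ _ hs)

lemma nodup_pvMerch (L : List (String × List (List String))) : (pvMerch L).Nodup := by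
  unfold pvMerch
  suffices h : ∀ (L : List (String × List (List String))) (s : List String), s.Nodup →
      (L.foldl (fun acc p => p.2.foldl (fun acc a => PySem.Set.add acc (PySem.List.pyGetD a 0 "")) acc) s).Nodup by
    exact h L [] List.nodup_nil
  intro L
  induction L with
  | nil => intro s hs; exact hs
  | cons p L ih => intro s hs; exact ih _ (nodup_foldl_add hs)

lemma mem_pvMerch_of_carrier {L : List (String × List (List String))} {m : String}
    (h : ∃ p ∈ L, p.2.any (fun a => PySem.List.pyGetD a 0 "" == m)) : m ∈ pvMerch L := by
  unfold pvMerch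
  suffices hgen : ∀ (L : List (String × List (List String))) (s : List String),
      (m ∈ s ∨ ∃ p ∈ L, p.2.any (fun a => PySem.List.pyGetD a 0 "" == m) = true) →
      m ∈ L.foldl (fun acc p => p.2.foldl (fun acc a => PySem.Set.add acc (PySem.List.pyGetD a 0 "")) acc) s by
    exact hgen L [] (Or.inr h)
  intro L
  induction L with
  | nil =>
      intro s hs
      rcases hs with h | ⟨p, hp, _⟩
      · exact h
      · simp at hp
  | cons p L ih =>
      intro s hs
      apply ih
      rcases hs with h | ⟨q, hq, hany⟩
      · exact Or.inl (mem_foldl_add.mpr (Or.inl h))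
      · rcases List.mem_cons.mp hq with rfl | hq
        · exact Or.inl (mem_foldl_add.mpr (Or.inr hany))
        · exact Or.inr ⟨q, hq, hany⟩

lemma pvCarriers_empty_of_not_mem {L : List (String × List (List String))} {m : String}
    (h : m ∉ pvMerch L) : pvCarriers L m = [] := by
  unfold pvCarriers
  rw [List.map_eq_nil_iff, List.filter_eq_nil_iff]
  intro p hp
  by_contra hc
  exact h (mem_pvMerch_of_carrier ⟨p, hp, by simpa using hc⟩)

lemma pvCarriers_subset {L : List (String × List (List String))} {m t : String}
    (h : t ∈ pvCarriers L m) : t ∈ L.map Prod.fst := by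
  unfold pvCarriers at h
  rcases List.mem_map.mp h with ⟨p, hp, rfl⟩
  exact List.mem_map.mpr ⟨p, (List.mem_filter.mp hp).1, rfl⟩

-- the inner-loop invariant: a Dict whose items are merch.map (m, g m ++ tr?) stays in that shape
lemma inner_fold (tr : String) (cars : List (List String)) :
    ∀ (merch : List String) (g : String → List String) (f : String → Bool)
      (d : PySem.Dict String (List String)),
      d.items = merch.map (fun m => (m, g m ++ (if f m then [tr] else []))) →
      merch.Nodup →
      (∀ m, tr ∉ g m) →
      (∀ m, m ∉ merch → g m = []) →
      (cars.foldl (fun dic a =>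
          match dic.get? (PySem.List.pyGetD a 0 "") with
          | none => dic.insert (PySem.List.pyGetD a 0 "") (PySem.Set.ofList [tr])
          | some set1 => dic.insert (PySem.List.pyGetD a 0 "") (PySem.Set.union set1 [tr])) d).items =
        (cars.foldl (fun acc a => PySem.Set.add acc (PySem.List.pyGetD a 0 "")) merch).map
          (fun m => (m, g m ++ (if (f m || cars.any (fun a => PySem.List.pyGetD a 0 "" == m)) then [tr] else []))) := by
  induction cars with
  | nil =>
      intro merch g f d hd hnd htr hg
      simpa using hd
  | cons a cars ih =>
      intro merch g f d hd hnd htr hg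
      have hkeys : d.keys = merch := by
        simp [PySem.Dict.keys, hd, List.map_map, Function.comp_def]
      by_cases hmem : PySem.List.pyGetD a 0 "" ∈ merch
      · -- existing key: overwrite in place
        have hget : d.get? (PySem.List.pyGetD a 0 "") = some (g (PySem.List.pyGetD a 0 "") ++ (if f (PySem.List.pyGetD a 0 "") then [tr] else [])) := by
          apply PySem.Dict.get?_of_mem_items
          · rw [hd]; exact List.mem_map.mpr ⟨PySem.List.pyGetD a 0 "", hmem, rfl⟩
          · rw [hkeys]; exact hnd
        have hcont : d.contains (PySem.List.pyGetD a 0 "") = true := by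
          rw [PySem.Dict.contains_eq_isSome_get?, hget]; rfl
        have hval : PySem.Set.union (g (PySem.List.pyGetD a 0 "") ++ (if f (PySem.List.pyGetD a 0 "") then [tr] else [])) [tr]
            = g (PySem.List.pyGetD a 0 "") ++ [tr] := by
          by_cases hf : f (PySem.List.pyGetD a 0 "")
          · simp [PySem.Set.union, PySem.Set.add, PySem.Set.contains, hf]
          · simp [PySem.Set.union, PySem.Set.add, PySem.Set.contains, hf, htr]
        have hitems : (d.insert (PySem.List.pyGetD a 0 "") (g (PySem.List.pyGetD a 0 "") ++ [tr])).items
            = merch.map (fun m => (m, g m ++ (if (f m || (PySem.List.pyGetD a 0 "" == m)) then [tr] else []))) := by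
          rw [PySem.Dict.items_insert_of_contains _ _ hcont, hd, List.map_map]
          apply List.map_congr_left
          intro m hm
          by_cases h : m = PySem.List.pyGetD a 0 ""
          · subst h; simp
          · simp [Function.comp, h, Ne.symm h]
        have hadd : PySem.Set.add merch (PySem.List.pyGetD a 0 "") = merch := by
          simp [PySem.Set.add, PySem.Set.contains, hmem]
        rw [List.foldl_cons, List.foldl_cons, hadd]
        simp only [hget]
        rw [hval,
          ih merch g (fun m => f m || (PySem.List.pyGetD a 0 "" == m)) _ hitems hnd htr hg]
        apply List.map_congr_left
        intro m hm
        simp [List.any_cons, Bool.or_assoc]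
      · -- new key: appended at the end
        have hget : d.get? (PySem.List.pyGetD a 0 "") = none := by
          rw [PySem.Dict.get?_eq_none_iff_not_mem_keys, hkeys]; exact hmem
        have hcont : d.contains (PySem.List.pyGetD a 0 "") = false := by
          rw [PySem.Dict.contains_eq_isSome_get?, hget]; rfl
        have hitems : (d.insert (PySem.List.pyGetD a 0 "") (PySem.Set.ofList [tr])).items
            = (merch ++ [PySem.List.pyGetD a 0 ""]).map
                (fun m => (m, g m ++ (if (f m || (PySem.List.pyGetD a 0 "" == m)) then [tr] else []))) := by
          rw [PySem.Dict.items_insert_of_not_contains _ _ hcont, hd, List.map_append]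
          congr 1
          · apply List.map_congr_left
            intro m hm
            have h : m ≠ PySem.List.pyGetD a 0 "" := fun e => hmem (e ▸ hm)
            simp [Ne.symm h]
          · simp [PySem.Set.ofList, PySem.Set.add, hg _ hmem]
        have hadd : PySem.Set.add merch (PySem.List.pyGetD a 0 "") = merch ++ [PySem.List.pyGetD a 0 ""] := by
          simp [PySem.Set.add, PySem.Set.contains, hmem]
        have hnd' : (merch ++ [PySem.List.pyGetD a 0 ""]).Nodup := by
          simp [List.nodup_append, hnd]
          exact fun x hx e => hmem (e ▸ hx)
        have hg' : ∀ m, m ∉ merch ++ [PySem.List.pyGetD a 0 ""] → g m = [] := by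
          intro m hm
          exact hg m (fun h => hm (List.mem_append.mpr (Or.inl h)))
        rw [List.foldl_cons, List.foldl_cons, hadd]
        simp only [hget]
        rw [ih (merch ++ [PySem.List.pyGetD a 0 ""]) g (fun m => f m || (PySem.List.pyGetD a 0 "" == m)) _ hitems hnd' htr hg']
        apply List.map_congr_left
        intro m hm
        simp [List.any_cons, Bool.or_assoc]

-- carriers lists are duplicate-free (they are sub-lists of the train keys)
lemma nodup_pvCarriers {L : List (String × List (List String))} (hnd : (L.map Prod.fst).Nodup)
    (m : String) : (pvCarriers L m).Nodup :=
  ((List.filter_sublist).map Prod.fst).nodup hnd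

-- the outer loop equals the per-merchandise description
lemma outer_fold : ∀ (L : List (String × List (List String))), (L.map Prod.fst).Nodup →
    (L.foldl (fun dic p =>
      p.2.foldl (fun dic a =>
        match dic.get? (PySem.List.pyGetD a 0 "") with
        | none => dic.insert (PySem.List.pyGetD a 0 "") (PySem.Set.ofList [p.1])
        | some set1 => dic.insert (PySem.List.pyGetD a 0 "") (PySem.Set.union set1 [p.1])) dic)
      (PySem.Dict.empty : PySem.Dict String (List String))).items =
      (pvMerch L).map (fun m => (m, pvCarriers L m)) := by
  intro L
  induction L using List.reverseRecOn with
  | nil => intro _; rfl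
  | append_singleton L p ih =>
      intro hnd
      rw [List.map_append] at hnd
      obtain ⟨hndL, -, hdisj⟩ := List.nodup_append.mp hnd
      have htr' : ∀ m, p.1 ∉ pvCarriers L m := by
        intro m hm
        exact hdisj _ (pvCarriers_subset hm) p.1 (by simp) rfl
      have hitems0 :
          (L.foldl (fun dic p =>
            p.2.foldl (fun dic a =>
              match dic.get? (PySem.List.pyGetD a 0 "") with
              | none => dic.insert (PySem.List.pyGetD a 0 "") (PySem.Set.ofList [p.1])
              | some set1 => dic.insert (PySem.List.pyGetD a 0 "") (PySem.Set.union set1 [p.1])) dic)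
            (PySem.Dict.empty : PySem.Dict String (List String))).items =
          (pvMerch L).map
            (fun m => (m, pvCarriers L m ++ (if (fun _ : String => false) m then [p.1] else []))) := by
        rw [ih hndL]; simp
      rw [List.foldl_append, List.foldl_cons, List.foldl_nil,
        inner_fold p.1 p.2 (pvMerch L) (pvCarriers L) (fun _ => false) _ hitems0
          (nodup_pvMerch L) htr' (fun m hm => pvCarriers_empty_of_not_mem hm)]
      have hm : pvMerch (L ++ [p]) =
          p.2.foldl (fun acc a => PySem.Set.add acc (PySem.List.pyGetD a 0 "")) (pvMerch L) := by
        simp [pvMerch, List.foldl_append]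
      rw [hm]
      apply List.map_congr_left
      intro m _
      simp only [pvCarriers, List.filter_append, List.map_append, Prod.mk.injEq, true_and]
      congr 1
      by_cases h : (p.2.any fun a => PySem.List.pyGetD a 0 "" == m) = true
      · simp [h]
      · simp [h]

-- ===== VERDICT (by name: the statement is the Claim_ definition above) =====
theorem trainsPerMerchandise_spec : Claim_equal_trainsPerMerchandise := by
  intro trains _ hpre
  unfold Spec_trainsPerMerchandise trainsPerMerchandise trainsPerMerchandise_alt
  rw [outer_fold trains hpre.1]
  apply List.map_congr_left
  intro m _
  exact congrArg (Prod.mk m) (PySem.Set.ofList_eq_self_of_nodup _ (nodup_pvCarriers hpre.1 m)).symm
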